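-- pv_equiv track=rewrite | github.com/CESEL/BatchBuilderResearch | RQ3/batching_techniques.py | batch_bisect
-- ===== SOURCE A (Python) =====
-- def runbatch(batch):
--
--     for test in batch:
--         if (test == False):
--             return False
--     return True
--
-- def batch_bisect(batch):
--     rc =0
--     lc =0
--
--
--     if (len(batch) <= 2):
--         return len(batch)
--     else:
--         sub_batch_right = batch[0:(int)(len(batch) / 2)]
--         sub_batch_left = batch[(int)(len(batch) / 2):len(batch)]
--         if (runbatch(sub_batch_right) == False):
--             rc= batch_bisect(sub_batch_right)
--
--         if (runbatch(sub_batch_left) == False):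
--             lc= batch_bisect(sub_batch_left)
--
--         return (rc +lc +2)
-- ===== SOURCE B (Python) =====
-- def batch_bisect(batch):
--     n = len(batch)
--     # prefix counts of failures: pref[i] = number of False among batch[:i]
--     pref = [0]
--     s = 0
--     for t in batch:
--         if not t:
--             s += 1
--         pref.append(s)
--
--     def go(lo, hi):
--         m = hi - lo
--         if m <= 2:
--             return m
--         mid = lo + m // 2
--         total = 2
--         if pref[mid] - pref[lo] > 0:
--             total += go(lo, mid)
--         if pref[hi] - pref[mid] > 0:
--             total += go(mid, hi)
--         return total
--
--     return go(0, n)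
-- ===== Notes on version B (the rewrite author's own statement) =====
-- stated objective: faster
-- what changed: B precomputes one prefix-sum array of failure counts and bisects over index ranges with O(1) contains-a-failure checks, instead of A's per-level list slicing and rescanning of each sub-batch.
import Mathlib
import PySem

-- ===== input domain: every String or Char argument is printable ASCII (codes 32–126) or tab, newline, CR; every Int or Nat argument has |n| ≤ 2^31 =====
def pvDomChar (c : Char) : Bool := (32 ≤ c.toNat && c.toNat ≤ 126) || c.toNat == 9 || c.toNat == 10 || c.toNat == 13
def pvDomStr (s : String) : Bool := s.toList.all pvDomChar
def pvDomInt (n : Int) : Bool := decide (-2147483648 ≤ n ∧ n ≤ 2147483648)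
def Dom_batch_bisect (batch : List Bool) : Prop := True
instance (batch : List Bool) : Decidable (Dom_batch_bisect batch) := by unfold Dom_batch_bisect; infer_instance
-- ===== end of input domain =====

-- B replaces A's list slicing at every recursion step by one O(n) prefix-sum of failure
-- counts plus an index-based recursion whose range checks are O(1): faster by a
-- constant-factor/asymptotic mechanism (no O(n) slice copies and rescans per level).

-- ===== PORT A =====
def runbatch : List Bool → Bool
  | [] => true
  | test :: rest => if test = false then false else runbatch rest

def batch_bisect (batch : List Bool) : Int :=
  if batch.length ≤ 2 then (batch.length : Int)
  else
    let sub_batch_right := PySem.List.slice batch (some 0) (some ((batch.length / 2 : Nat) : Int))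
    let sub_batch_left := PySem.List.slice batch (some ((batch.length / 2 : Nat) : Int)) (some ((batch.length : Nat) : Int))
    let rc : Int := if runbatch sub_batch_right = false then batch_bisect sub_batch_right else 0
    let lc : Int := if runbatch sub_batch_left = false then batch_bisect sub_batch_left else 0
    rc + lc + 2
termination_by batch.length
decreasing_by
  all_goals simp only [PySem.List.slice_zero_start, PySem.List.slice_to_natCast,
    PySem.List.slice_natCast, List.length_take, List.length_drop]
  all_goals omega

-- ===== PORT B =====
-- Source B's inner `go(lo, hi)` on index ranges over the precomputed prefix list
def pvGo (pref : List Int) (lo hi : Nat) : Int :=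
  if h : hi - lo ≤ 2 then ((hi - lo : Nat) : Int)
  else
    let mid := lo + (hi - lo) / 2
    let total : Int := 2
    let total := if pref.getD mid 0 - pref.getD lo 0 > 0 then total + pvGo pref lo mid else total
    let total := if pref.getD hi 0 - pref.getD mid 0 > 0 then total + pvGo pref mid hi else total
    total
termination_by hi - lo
decreasing_by all_goals omega

def batch_bisect_alt (batch : List Bool) : Int :=
  let n := batch.length
  let ps := batch.foldl
    (fun (acc : List Int × Int) t =>
      let s := if t then acc.2 else acc.2 + 1
      (acc.1 ++ [s], s))
    ([(0 : Int)], (0 : Int))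
  pvGo ps.1 0 n

-- ===== PRECONDITION & SPEC =====
def Spec_batch_bisect (batch : List Bool) (out : Int) : Prop := out = batch_bisect_alt batch
instance (batch : List Bool) (out : Int) : Decidable (Spec_batch_bisect batch out) := by unfold Spec_batch_bisect; infer_instance

-- ===== CLAIM (what is proved, stated in full; the proofs are below) =====
def Claim_equal_batch_bisect : Prop := ∀ (batch : List Bool), Dom_batch_bisect batch → Spec_batch_bisect batch (batch_bisect batch)

-- ===== LEMMAS AND PROOFS =====

def cfI (xs : List Bool) : Int := (xs.count false : Int)

def prefOf (batch : List Bool) : List Int :=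
  (0 : Int) :: (List.range batch.length).map (fun i => cfI (batch.take (i + 1)))

theorem fold_eq (xs : List Bool) : ∀ (p : List Int) (s : Int),
    (xs.foldl (fun (acc : List Int × Int) t =>
        let s' := if t then acc.2 else acc.2 + 1
        (acc.1 ++ [s'], s')) (p, s))
    = (p ++ (List.range xs.length).map (fun i => s + cfI (xs.take (i + 1))), s + cfI xs) := by
  induction xs using List.reverseRecOn with
  | nil => intro p s; simp [cfI]
  | append_singleton ys t ih =>
    intro p s
    rw [List.foldl_append, ih]
    simp only [List.foldl_cons, List.foldl_nil]
    have hd : (if t then s + cfI ys else s + cfI ys + 1) = s + cfI (ys ++ [t]) := by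
      cases t <;> simp [cfI, List.count_append] <;> push_cast <;> ring
    rw [hd]
    simp only [Prod.mk.injEq]
    refine ⟨?_, trivial⟩
    rw [List.length_append, List.length_singleton, List.range_succ, List.map_append,
      List.map_singleton, List.append_assoc]
    congr 1
    congr 1
    · refine List.map_congr_left ?_
      intro i hi
      rw [List.mem_range] at hi
      rw [List.take_append_of_le_length (by omega)]
    · rw [List.take_of_length_le (by simp)]

theorem alt_eq (batch : List Bool) :
    batch_bisect_alt batch = pvGo (prefOf batch) 0 batch.length := by
  unfold batch_bisect_alt
  rw [fold_eq]
  simp [prefOf]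

theorem pref_getD (batch : List Bool) (i : Nat) (h : i ≤ batch.length) :
    (prefOf batch).getD i 0 = cfI (batch.take i) := by
  unfold prefOf
  cases i with
  | zero => simp [cfI]
  | succ j =>
    rw [List.getD_cons_succ, List.getD_eq_getElem?_getD, List.getElem?_map,
      List.getElem?_range (by omega)]
    simp

theorem run_eq_false_iff (xs : List Bool) : (runbatch xs = false) ↔ false ∈ xs := by
  induction xs with
  | nil => simp [runbatch]
  | cons t rest ih =>
    cases t <;> simp [runbatch, ih]

theorem cf_take_add (batch : List Bool) (a b : Nat) :
    cfI (batch.take (a + b)) = cfI (batch.take a) + cfI ((batch.drop a).take b) := by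
  rw [List.take_add]
  simp [cfI, List.count_append]

theorem A_base (xs : List Bool) (h : xs.length ≤ 2) : batch_bisect xs = (xs.length : Int) := by
  rw [batch_bisect]; simp [h]

theorem A_step (xs : List Bool) (h : ¬ xs.length ≤ 2) :
    batch_bisect xs =
      (if runbatch (xs.take (xs.length / 2)) = false then batch_bisect (xs.take (xs.length / 2)) else 0)
      + (if runbatch (xs.drop (xs.length / 2)) = false then batch_bisect (xs.drop (xs.length / 2)) else 0) + 2 := by
  rw [batch_bisect]
  simp only [if_neg h, PySem.List.slice_zero_start, PySem.List.slice_to_natCast,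
    PySem.List.slice_natCast]
  rw [List.take_of_length_le (l := xs.drop (xs.length / 2)) (by simp)]

theorem go_eq (batch : List Bool) : ∀ (k lo hi : Nat), hi - lo ≤ k → lo ≤ hi → hi ≤ batch.length →
    pvGo (prefOf batch) lo hi = batch_bisect ((batch.drop lo).take (hi - lo)) := by
  intro k
  induction k with
  | zero =>
    intro lo hi hk hlh hhn
    have h0 : hi - lo = 0 := by omega
    rw [pvGo, dif_pos (by omega), A_base _ (by simp; omega), h0]
    simp
  | succ k ih =>
    intro lo hi hk hlh hhn
    have hlen : ((batch.drop lo).take (hi - lo)).length = hi - lo := by simp; omega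
    by_cases h2 : hi - lo ≤ 2
    · rw [pvGo, dif_pos h2, A_base _ (by rw [hlen]; omega), hlen]
    · -- conditions: prefix-difference positive ↔ the segment contains a failure
      have hcond : ∀ a b : Nat, lo ≤ a → a ≤ b → b ≤ hi →
          ((prefOf batch).getD b 0 - (prefOf batch).getD a 0 > 0
            ↔ runbatch ((batch.drop a).take (b - a)) = false) := by
        intro a b hla hab hbh
        rw [pref_getD batch a (by omega), pref_getD batch b (by omega), run_eq_false_iff]
        have hb : b = a + (b - a) := by omega
        have key : cfI (batch.take b) = cfI (batch.take a) + cfI ((batch.drop a).take (b - a)) := by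
          conv_lhs => rw [hb]
          rw [cf_take_add]
        rw [key]
        unfold cfI
        rw [← List.count_pos_iff (a := false)]
        omega
      have hA := A_step ((batch.drop lo).take (hi - lo)) (by rw [hlen]; omega)
      rw [hlen] at hA
      have hR : ((batch.drop lo).take (hi - lo)).take ((hi - lo) / 2)
          = (batch.drop lo).take ((lo + (hi - lo) / 2) - lo) := by
        rw [List.take_take]
        congr 1
        omega
      have hL : ((batch.drop lo).take (hi - lo)).drop ((hi - lo) / 2)
          = (batch.drop (lo + (hi - lo) / 2)).take (hi - (lo + (hi - lo) / 2)) := by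
        rw [List.drop_take, List.drop_drop]
        congr 1
        omega
      rw [hR, hL] at hA
      simp only [Nat.add_sub_cancel_left] at hA
      have c1 := hcond lo (lo + (hi - lo) / 2) (by omega) (by omega) (by omega)
      have c2 := hcond (lo + (hi - lo) / 2) hi (by omega) (by omega) (by omega)
      simp only [Nat.add_sub_cancel_left] at c1
      have r1 := ih lo (lo + (hi - lo) / 2) (by omega) (by omega) (by omega)
      have r2 := ih (lo + (hi - lo) / 2) hi (by omega) (by omega) (by omega)
      simp only [Nat.add_sub_cancel_left] at r1
      rw [pvGo, dif_neg h2]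
      simp only [c1, c2, r1, r2, hA]
      split_ifs <;> ring

-- ===== VERDICT (by name: the statement is the Claim_ definition above) =====
theorem batch_bisect_spec : Claim_equal_batch_bisect := by
  intro batch _
  unfold Spec_batch_bisect
  rw [alt_eq]
  rw [go_eq batch batch.length 0 batch.length (by omega) (by omega) (by omega)]
  simp
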